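-- pv_equiv track=rewrite | github.com/StarSein/BaekJoon | 백준/Gold/16973. 직사각형 탈출/직사각형 탈출.py | solution
-- ===== SOURCE A (Python) =====
-- from collections import deque
-- from typing import List
--
-- def solution(N: int, M: int, grid: List[List[int]],
--              H: int, W: int, Sr: int, Sc: int, Fr: int, Fc: int) -> int:
--     Sr, Sc, Fr, Fc = Sr - 1, Sc - 1, Fr - 1, Fc - 1
--     pref_sum = [[0 for c in range(M + 1)] for r in range(N + 1)]
--     for r in range(1, N + 1):
--         for c in range(1, M + 1):
--             pref_sum[r][c] = grid[r - 1][c - 1]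
--     for r in range(1, N + 1):
--         for c in range(1, M):
--             pref_sum[r][c + 1] += pref_sum[r][c]
--     for c in range(1, M + 1):
--         for r in range(1, N):
--             pref_sum[r + 1][c] += pref_sum[r][c]
--     is_able = [[False for c in range(M)] for r in range(N)]
--     for r in range(N - H + 1):
--         for c in range(M - W + 1):
--             is_able[r][c] = (pref_sum[r + H][c + W] - pref_sum[r + H][c] - pref_sum[r][c + W] + pref_sum[r][c] == 0)
--
--     visited = [[False for c in range(M)] for r in range(N)]
--     dir_list = [(0, 1), (1, 0), (0, -1), (-1, 0)]
--     dq = deque()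
--     dq.append((Sr, Sc))
--     visited[Sr][Sc] = True
--     move_cnt = 0
--     while dq:
--         for _ in range(len(dq)):
--             cr, cc = dq.popleft()
--             if cr == Fr and cc == Fc:
--                 return move_cnt
--             for dr, dc in dir_list:
--                 nr, nc = cr + dr, cc + dc
--                 if 0 <= nr < N and 0 <= nc < M and is_able[nr][nc] and not visited[nr][nc]:
--                     dq.append((nr, nc))
--                     visited[nr][nc] = True
--         move_cnt += 1
--     return -1
-- ===== SOURCE B (Python) =====
-- from collections import deque
-- from typing import List
--
-- def solution(N: int, M: int, grid: List[List[int]],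
--              H: int, W: int, Sr: int, Sc: int, Fr: int, Fc: int) -> int:
--     # Same coordinate shift and level-counted BFS as the original; the summed-area
--     # table is replaced by a direct per-position block-sum scan.
--     Sr, Sc, Fr, Fc = Sr - 1, Sc - 1, Fr - 1, Fc - 1
--     is_able = [[False for c in range(M)] for r in range(N)]
--     for r in range(N - H + 1):
--         for c in range(M - W + 1):
--             s = 0
--             for i in range(H):
--                 for j in range(W):
--                     s += grid[r + i][c + j]
--             is_able[r][c] = (s == 0)
--
--     visited = [[False for c in range(M)] for r in range(N)]
--     dir_list = [(0, 1), (1, 0), (0, -1), (-1, 0)]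
--     dq = deque()
--     dq.append((Sr, Sc))
--     visited[Sr][Sc] = True
--     move_cnt = 0
--     while dq:
--         for _ in range(len(dq)):
--             cr, cc = dq.popleft()
--             if cr == Fr and cc == Fc:
--                 return move_cnt
--             for dr, dc in dir_list:
--                 nr, nc = cr + dr, cc + dc
--                 if 0 <= nr < N and 0 <= nc < M and is_able[nr][nc] and not visited[nr][nc]:
--                     dq.append((nr, nc))
--                     visited[nr][nc] = True
--         move_cnt += 1
--     return -1
-- ===== Notes on version B (the rewrite author's own statement) =====
-- stated objective: simpler
-- what changed: drops the three-pass summed-area (prefix-sum) table and its four-corner query, computing each is_able cell by summing its HxW block of the grid directly; the coordinate shift and level-counted BFS are unchanged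
import Mathlib
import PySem

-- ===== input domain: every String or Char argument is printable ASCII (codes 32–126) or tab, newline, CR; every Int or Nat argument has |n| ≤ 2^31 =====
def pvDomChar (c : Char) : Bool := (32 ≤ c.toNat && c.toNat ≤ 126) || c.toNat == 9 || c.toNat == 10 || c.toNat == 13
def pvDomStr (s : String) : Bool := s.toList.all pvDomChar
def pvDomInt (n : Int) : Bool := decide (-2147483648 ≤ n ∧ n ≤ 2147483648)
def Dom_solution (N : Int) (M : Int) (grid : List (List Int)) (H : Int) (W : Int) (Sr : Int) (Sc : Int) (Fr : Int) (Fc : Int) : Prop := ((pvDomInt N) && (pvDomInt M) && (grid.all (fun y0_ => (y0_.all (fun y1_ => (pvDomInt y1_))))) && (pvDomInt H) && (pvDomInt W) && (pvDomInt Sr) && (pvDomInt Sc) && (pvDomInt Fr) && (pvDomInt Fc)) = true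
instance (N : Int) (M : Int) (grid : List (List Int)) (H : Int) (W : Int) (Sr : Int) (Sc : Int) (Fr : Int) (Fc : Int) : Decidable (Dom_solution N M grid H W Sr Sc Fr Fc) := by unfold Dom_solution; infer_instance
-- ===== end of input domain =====

-- B replaces A's three-pass summed-area table by a direct per-position block-sum scan;
-- the coordinate shift and the level-counted BFS are unchanged (and shared below as pvBFS).

-- 2D read grid[r][c] with Python index semantics (wraparound for negatives, default out of range)
def pvGet2 {α : Type} (d : α) (p : List (List α)) (r c : Int) : α :=
  PySem.List.pyGetD (PySem.List.pyGetD p r []) c d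

-- 2D write p[r][c] = v with Python index semantics (no-op out of range; in-range under Pre_)
def pvSet2 {α : Type} (p : List (List α)) (r c : Int) (v : α) : List (List α) :=
  PySem.List.pySetD p r (PySem.List.pySetD (PySem.List.pyGetD p r []) c v)

def pvDirs : List (Int × Int) := [(0, 1), (1, 0), (0, -1), (-1, 0)]

-- inner 'for dr, dc in dir_list' body: conditionally enqueue and mark the four neighbours
def pvStepDirs (N M : Int) (isAble : List (List Bool)) (cr cc : Int)
    (s : List (Int × Int) × List (List Bool)) : List (Int × Int) × List (List Bool) :=
  pvDirs.foldl (fun s d =>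
    if 0 ≤ cr + d.1 ∧ cr + d.1 < N ∧ 0 ≤ cc + d.2 ∧ cc + d.2 < M ∧
       pvGet2 false isAble (cr + d.1) (cc + d.2) = true ∧
       pvGet2 false s.2 (cr + d.1) (cc + d.2) = false
    then (s.1 ++ [(cr + d.1, cc + d.2)], pvSet2 s.2 (cr + d.1) (cc + d.2) true)
    else s) s

-- 'for _ in range(len(dq))': process one BFS level; none = the goal was dequeued (early return)
def pvLevel (N M Fr Fc : Int) (isAble : List (List Bool)) :
    List (Int × Int) → List (Int × Int) → List (List Bool) →
    Option (List (Int × Int) × List (List Bool))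
  | [], acc, vis => some (acc, vis)
  | (cr, cc) :: rest, acc, vis =>
    if cr = Fr ∧ cc = Fc then none
    else
      let s := pvStepDirs N M isAble cr cc (acc, vis)
      pvLevel N M Fr Fc isAble rest s.1 s.2

-- 'while dq:' with fuel (each level marks fresh cells, so (N*M).toNat + 2 levels always suffice)
def pvBFS (N M Fr Fc : Int) (isAble : List (List Bool)) :
    Nat → List (Int × Int) → List (List Bool) → Int → Int
  | 0, _, _, _ => -1
  | fuel + 1, dq, vis, moveCnt =>
    if dq.isEmpty then -1
    else
      match pvLevel N M Fr Fc isAble dq [] vis with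
      | none => moveCnt
      | some (next, vis') => pvBFS N M Fr Fc isAble fuel next vis' (moveCnt + 1)

-- ===== PORT A =====
def solution (N : Int) (M : Int) (grid : List (List Int)) (H : Int) (W : Int) (Sr : Int) (Sc : Int) (Fr : Int) (Fc : Int) : Int :=
  let Sr := Sr - 1
  let Sc := Sc - 1
  let Fr := Fr - 1
  let Fc := Fc - 1
  let pref0 := (PySem.List.pyRange 0 (N + 1) 1).map
    (fun _ => (PySem.List.pyRange 0 (M + 1) 1).map (fun _ => (0 : Int)))
  let pref1 := (PySem.List.pyRange 1 (N + 1) 1).foldl (fun p r =>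
    (PySem.List.pyRange 1 (M + 1) 1).foldl (fun p c =>
      pvSet2 p r c (pvGet2 0 grid (r - 1) (c - 1))) p) pref0
  let pref2 := (PySem.List.pyRange 1 (N + 1) 1).foldl (fun p r =>
    (PySem.List.pyRange 1 M 1).foldl (fun p c =>
      pvSet2 p r (c + 1) (pvGet2 0 p r (c + 1) + pvGet2 0 p r c)) p) pref1
  let pref3 := (PySem.List.pyRange 1 (M + 1) 1).foldl (fun p c =>
    (PySem.List.pyRange 1 N 1).foldl (fun p r =>
      pvSet2 p (r + 1) c (pvGet2 0 p (r + 1) c + pvGet2 0 p r c)) p) pref2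
  let able0 := (PySem.List.pyRange 0 N 1).map
    (fun _ => (PySem.List.pyRange 0 M 1).map (fun _ => false))
  let isAble := (PySem.List.pyRange 0 (N - H + 1) 1).foldl (fun a r =>
    (PySem.List.pyRange 0 (M - W + 1) 1).foldl (fun a c =>
      pvSet2 a r c (decide (pvGet2 0 pref3 (r + H) (c + W) - pvGet2 0 pref3 (r + H) c
        - pvGet2 0 pref3 r (c + W) + pvGet2 0 pref3 r c = 0))) a) able0
  let vis0 := (PySem.List.pyRange 0 N 1).map
    (fun _ => (PySem.List.pyRange 0 M 1).map (fun _ => false))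
  let vis := pvSet2 vis0 Sr Sc true
  pvBFS N M Fr Fc isAble ((N * M).toNat + 2) [(Sr, Sc)] vis 0

-- ===== PORT B =====
def solution_alt (N : Int) (M : Int) (grid : List (List Int)) (H : Int) (W : Int) (Sr : Int) (Sc : Int) (Fr : Int) (Fc : Int) : Int :=
  let Sr := Sr - 1
  let Sc := Sc - 1
  let Fr := Fr - 1
  let Fc := Fc - 1
  let able0 := (PySem.List.pyRange 0 N 1).map
    (fun _ => (PySem.List.pyRange 0 M 1).map (fun _ => false))
  let isAble := (PySem.List.pyRange 0 (N - H + 1) 1).foldl (fun a r =>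
    (PySem.List.pyRange 0 (M - W + 1) 1).foldl (fun a c =>
      pvSet2 a r c (decide ((PySem.List.pyRange 0 H 1).foldl (fun s i =>
        (PySem.List.pyRange 0 W 1).foldl (fun s j =>
          s + pvGet2 0 grid (r + i) (c + j)) s) 0 = 0))) a) able0
  let vis0 := (PySem.List.pyRange 0 N 1).map
    (fun _ => (PySem.List.pyRange 0 M 1).map (fun _ => false))
  let vis := pvSet2 vis0 Sr Sc true
  pvBFS N M Fr Fc isAble ((N * M).toNat + 2) [(Sr, Sc)] vis 0

-- ===== PRECONDITION & SPEC =====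
-- Pre_: exactly the inputs where the Python A returns normally: the grid must cover N×M
-- (else the prefix-sum build raises IndexError), the is_able loops must be empty or have
-- 1 ≤ H and 1 ≤ W (else they index row N / column M: IndexError), and the start cell must be
-- a valid (possibly negative, Python-wraparound) index into the N×M visited table.
def Pre_solution (N : Int) (M : Int) (grid : List (List Int)) (H : Int) (W : Int) (Sr : Int) (Sc : Int) (Fr : Int) (Fc : Int) : Prop :=
  1 ≤ N ∧ 1 ≤ M ∧ N ≤ (grid.length : Int) ∧
  (∀ row ∈ grid.take N.toNat, M ≤ (row.length : Int)) ∧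
  (N - H + 1 ≤ 0 ∨ M - W + 1 ≤ 0 ∨ (1 ≤ H ∧ 1 ≤ W)) ∧
  (-N ≤ Sr - 1 ∧ Sr - 1 < N) ∧ (-M ≤ Sc - 1 ∧ Sc - 1 < M)
instance (N : Int) (M : Int) (grid : List (List Int)) (H : Int) (W : Int) (Sr : Int) (Sc : Int) (Fr : Int) (Fc : Int) : Decidable (Pre_solution N M grid H W Sr Sc Fr Fc) := by unfold Pre_solution; infer_instance

def pvWitness_solution : Int × Int × List (List Int) × Int × Int × Int × Int × Int × Int :=
  (2, 2, [[0, 0], [0, 1]], 1, 1, 1, 1, 2, 1)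

def Spec_solution (N : Int) (M : Int) (grid : List (List Int)) (H : Int) (W : Int) (Sr : Int) (Sc : Int) (Fr : Int) (Fc : Int) (out : Int) : Prop := out = solution_alt N M grid H W Sr Sc Fr Fc
instance (N : Int) (M : Int) (grid : List (List Int)) (H : Int) (W : Int) (Sr : Int) (Sc : Int) (Fr : Int) (Fc : Int) (out : Int) : Decidable (Spec_solution N M grid H W Sr Sc Fr Fc out) := by unfold Spec_solution; infer_instance

-- ===== CLAIM (what is proved, stated in full; the proofs are below) =====
def Claim_equal_solution : Prop := ∀ (N : Int) (M : Int) (grid : List (List Int)) (H : Int) (W : Int) (Sr : Int) (Sc : Int) (Fr : Int) (Fc : Int), Dom_solution N M grid H W Sr Sc Fr Fc → Pre_solution N M grid H W Sr Sc Fr Fc → Spec_solution N M grid H W Sr Sc Fr Fc (solution N M grid H W Sr Sc Fr Fc)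

-- ===== LEMMAS AND PROOFS =====

lemma pvPySetD_nonneg {α : Type} (xs : List α) (i : Int) (v : α) (h : 0 ≤ i) :
    PySem.List.pySetD xs i v = xs.set i.toNat v := by
  by_cases hlt : i < (xs.length : Int) <;>
    simp only [PySem.List.pySetD, PySem.List.pySet?, PySem.List.pyIdx?, h, if_pos, hlt,
      if_false, Option.map_some, Option.map_none, Option.getD_some, Option.getD_none]
  exact (List.set_eq_of_length_le (by omega)).symm

lemma pvPyGetD_nonneg {α : Type} (xs : List α) (i : Int) (d : α) (h : 0 ≤ i) :
    PySem.List.pyGetD xs i d = xs.getD i.toNat d := by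
  by_cases hlt : i < (xs.length : Int) <;>
    simp only [PySem.List.pyGetD, PySem.List.pyGet?, PySem.List.pyIdx?, h, if_pos, hlt,
      if_false, Option.bind_some, Option.bind_none, List.getD_eq_getElem?_getD]
  rw [List.getElem?_eq_none (by omega)]

def pvNG {α : Type} (d : α) (p : List (List α)) (r c : Nat) : α := (p.getD r []).getD c d
def pvNS {α : Type} (p : List (List α)) (r c : Nat) (v : α) : List (List α) :=
  p.set r ((p.getD r []).set c v)

lemma pvGet2_nonneg {α : Type} (d : α) (p : List (List α)) (r c : Int) (hr : 0 ≤ r) (hc : 0 ≤ c) :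
    pvGet2 d p r c = pvNG d p r.toNat c.toNat := by
  rw [pvGet2, pvPyGetD_nonneg _ _ _ hr, pvPyGetD_nonneg _ _ _ hc]; rfl

lemma pvSet2_nonneg {α : Type} (p : List (List α)) (r c : Int) (v : α) (hr : 0 ≤ r) (hc : 0 ≤ c) :
    pvSet2 p r c v = pvNS p r.toNat c.toNat v := by
  rw [pvSet2, pvPyGetD_nonneg _ _ _ hr, pvPySetD_nonneg _ _ _ hc, pvPySetD_nonneg _ _ _ hr]; rfl

def pvDims {α : Type} (p : List (List α)) (n m : Nat) : Prop :=
  p.length = n ∧ ∀ row ∈ p, row.length = m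

lemma pvDims_rowlen {α : Type} {p : List (List α)} {n m : Nat} (h : pvDims p n m)
    {r : Nat} (hr : r < n) : (p.getD r []).length = m := by
  have hr' : r < p.length := h.1 ▸ hr
  rw [List.getD_eq_getElem p [] hr']
  exact h.2 _ (List.getElem_mem _)

lemma pvDims_pvNS {α : Type} {p : List (List α)} {n m : Nat} (h : pvDims p n m)
    (r c : Nat) (v : α) : pvDims (pvNS p r c v) n m := by
  by_cases hr : r < p.length
  · refine ⟨by simp [pvNS, h.1], ?_⟩
    intro row hrow
    rcases List.mem_or_eq_of_mem_set hrow with h1 | h1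
    · exact h.2 _ h1
    · rw [h1, List.length_set]
      exact pvDims_rowlen h (h.1 ▸ hr)
  · rw [pvNS, List.set_eq_of_length_le (by omega)]
    exact h

lemma pvNG_pvNS {α : Type} (d : α) {p : List (List α)} {n m : Nat} (hd : pvDims p n m)
    {r c : Nat} (hr : r < n) (hc : c < m) (v : α) (r' c' : Nat) :
    pvNG d (pvNS p r c v) r' c' = if r' = r ∧ c' = c then v else pvNG d p r' c' := by
  have hrlen : r < p.length := hd.1 ▸ hr
  have hclen : c < (p[r]?.getD []).length := by
    have := pvDims_rowlen hd hr
    rw [List.getD_eq_getElem?_getD] at this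
    omega
  unfold pvNG pvNS
  rcases eq_or_ne r' r with h1 | h1
  · subst h1
    rcases eq_or_ne c' c with h2 | h2
    · subst h2
      simp only [List.getElem?_eq_getElem hrlen, Option.getD_some] at hclen
      simp [List.getD_eq_getElem?_getD, List.getElem?_set, hrlen, hclen]
    · simp [List.getD_eq_getElem?_getD, List.getElem?_set, hrlen, h2, Ne.symm h2]
  · simp [List.getD_eq_getElem?_getD, List.getElem?_set, h1, Ne.symm h1]

lemma pvDims_foldl {α β : Type} {n m : Nat} (step : List (List α) → β → List (List α))
    (hstep : ∀ p x, pvDims p n m → pvDims (step p x) n m) :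
    ∀ (l : List β) (p : List (List α)), pvDims p n m → pvDims (l.foldl step p) n m := by
  intro l
  induction l with
  | nil => intro p hp; exact hp
  | cons x xs ih => intro p hp; exact ih _ (hstep p x hp)

lemma pvWriteRow {α : Type} (d : α) {n m : Nat} (F : Nat → Nat → α) (k : Nat) (hk : k < n) :
    ∀ (u : Nat), u ≤ m → ∀ (p : List (List α)), pvDims p (n+1) (m+1) → ∀ r' c',
    pvNG d ((List.range u).foldl (fun p j => pvNS p (k+1) (j+1) (F k j)) p) r' c'
      = if r' = k+1 ∧ 1 ≤ c' ∧ c' ≤ u then F k (c'-1) else pvNG d p r' c' := by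
  intro u
  induction u with
  | zero => intro _ p hp r' c'; simp [List.range_zero]; intro h; omega
  | succ u ih =>
    intro hu p hp r' c'
    rw [List.range_succ, List.foldl_append, List.foldl_cons, List.foldl_nil]
    have hq : pvDims ((List.range u).foldl (fun p j => pvNS p (k+1) (j+1) (F k j)) p) (n+1) (m+1) :=
      pvDims_foldl _ (fun p x hp => pvDims_pvNS hp _ _ _) _ _ hp
    rw [pvNG_pvNS d hq (by omega) (by omega)]
    rw [ih (by omega) p hp]
    split_ifs with h1 h2 h3 h4 h5 <;> first
      | rfl
      | (try omega)
      | (exfalso; omega)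
    · obtain ⟨_, _⟩ := h1; congr 1; omega


lemma pvWrite2 {α : Type} (d : α) {n m : Nat} (F : Nat → Nat → α) (u : Nat) (hu : u ≤ m) :
    ∀ (t : Nat), t ≤ n → ∀ (p : List (List α)), pvDims p (n+1) (m+1) → ∀ r' c',
    pvNG d ((List.range t).foldl
        (fun p k => (List.range u).foldl (fun p j => pvNS p (k+1) (j+1) (F k j)) p) p) r' c'
      = if 1 ≤ r' ∧ r' ≤ t ∧ 1 ≤ c' ∧ c' ≤ u then F (r'-1) (c'-1) else pvNG d p r' c' := by
  intro t
  induction t with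
  | zero => intro _ p hp r' c'; simp [List.range_zero]; intro h; omega
  | succ t ih =>
    intro ht p hp r' c'
    rw [List.range_succ, List.foldl_append, List.foldl_cons, List.foldl_nil]
    have hq : pvDims ((List.range t).foldl
        (fun p k => (List.range u).foldl (fun p j => pvNS p (k+1) (j+1) (F k j)) p) p) (n+1) (m+1) :=
      pvDims_foldl _ (fun p x hp => pvDims_foldl _ (fun p x hp => pvDims_pvNS hp _ _ _) _ _ hp) _ _ hp
    rw [pvWriteRow d F t (by omega) u hu _ hq]
    simp only [ih (by omega) p hp]
    split_ifs <;> first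
      | rfl
      | omega
      | (congr 1 <;> omega)

lemma pvAcc2 {n m : Nat} (r : Nat) (hrn : r ≤ n) :
    ∀ (t : Nat), t + 1 ≤ m → ∀ (p : List (List Int)), pvDims p (n+1) (m+1) → ∀ r' c',
    pvNG 0 ((List.range t).foldl
        (fun p k => pvNS p r (k+2) (pvNG 0 p r (k+2) + pvNG 0 p r (k+1))) p) r' c'
      = if r' = r ∧ 1 ≤ c' ∧ c' ≤ t+1 then ∑ j ∈ Finset.range c', pvNG 0 p r (j+1)
        else pvNG 0 p r' c' := by
  intro t
  induction t with
  | zero =>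
    intro _ p hp r' c'
    simp only [List.range_zero, List.foldl_nil]
    split_ifs with h
    · rw [show c' = 1 by omega, Finset.sum_range_one, h.1]
    · rfl
  | succ t ih =>
    intro ht p hp r' c'
    rw [List.range_succ, List.foldl_append, List.foldl_cons, List.foldl_nil]
    have hq : pvDims ((List.range t).foldl
        (fun p k => pvNS p r (k+2) (pvNG 0 p r (k+2) + pvNG 0 p r (k+1))) p) (n+1) (m+1) :=
      pvDims_foldl _ (fun p x hp => pvDims_pvNS hp _ _ _) _ _ hp
    rw [pvNG_pvNS 0 hq (by omega) (by omega), ih (by omega) p hp r (t+2),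
      ih (by omega) p hp r (t+1), ih (by omega) p hp r' c']
    rw [if_neg (show ¬(r = r ∧ 1 ≤ t+2 ∧ t+2 ≤ t+1) by omega),
      if_pos (show r = r ∧ 1 ≤ t+1 ∧ t+1 ≤ t+1 by omega)]
    by_cases hout : r' = r ∧ c' = t+2
    · rw [if_pos hout, if_pos (show r' = r ∧ 1 ≤ c' ∧ c' ≤ t+1+1 by omega)]
      rw [hout.2, show t+2 = (t+1)+1 by omega, Finset.sum_range_succ, Finset.sum_range_succ]
      ring_nf
      rw [Nat.add_comm 1 t, Finset.sum_range_succ]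
      ring_nf
    · rw [if_neg hout]
      by_cases hin : r' = r ∧ 1 ≤ c' ∧ c' ≤ t+1
      · rw [if_pos hin, if_pos (by omega)]
      · rw [if_neg hin, if_neg (by omega)]

lemma pvPass2 {n m : Nat} (hm1 : 1 ≤ m) :
    ∀ (s : Nat), s ≤ n → ∀ (p : List (List Int)), pvDims p (n+1) (m+1) → ∀ r' c',
    pvNG 0 ((List.range s).foldl (fun p k => (List.range (m-1)).foldl
        (fun p j => pvNS p (k+1) (j+2) (pvNG 0 p (k+1) (j+2) + pvNG 0 p (k+1) (j+1))) p) p) r' c'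
      = if 1 ≤ r' ∧ r' ≤ s ∧ 1 ≤ c' ∧ c' ≤ m then ∑ j ∈ Finset.range c', pvNG 0 p r' (j+1)
        else pvNG 0 p r' c' := by
  intro s
  induction s with
  | zero => intro _ p hp r' c'; simp [List.range_zero]; intro h; omega
  | succ s ih =>
    intro hs p hp r' c'
    rw [List.range_succ, List.foldl_append, List.foldl_cons, List.foldl_nil]
    have hq : pvDims ((List.range s).foldl (fun p k => (List.range (m-1)).foldl
        (fun p j => pvNS p (k+1) (j+2) (pvNG 0 p (k+1) (j+2) + pvNG 0 p (k+1) (j+1))) p) p) (n+1) (m+1) :=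
      pvDims_foldl _ (fun p x hp => pvDims_foldl _ (fun p x hp => pvDims_pvNS hp _ _ _) _ _ hp) _ _ hp
    rw [pvAcc2 (s+1) (by omega) (m-1) (by omega) _ hq]
    by_cases hout : r' = s+1 ∧ 1 ≤ c' ∧ c' ≤ (m-1)+1
    · rw [if_pos hout, if_pos (show 1 ≤ r' ∧ r' ≤ s+1 ∧ 1 ≤ c' ∧ c' ≤ m by omega)]
      apply Finset.sum_congr rfl
      intro j hj
      rw [ih (by omega) p hp (s+1) (j+1), if_neg (by omega), hout.1]
    · rw [if_neg hout, ih (by omega) p hp r' c']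
      by_cases hin : 1 ≤ r' ∧ r' ≤ s ∧ 1 ≤ c' ∧ c' ≤ m
      · rw [if_pos hin, if_pos (by omega)]
      · rw [if_neg hin, if_neg (by omega)]

lemma pvAcc3 {n m : Nat} (c : Nat) (hcm : c ≤ m) :
    ∀ (t : Nat), t + 1 ≤ n → ∀ (p : List (List Int)), pvDims p (n+1) (m+1) → ∀ r' c',
    pvNG 0 ((List.range t).foldl
        (fun p k => pvNS p (k+2) c (pvNG 0 p (k+2) c + pvNG 0 p (k+1) c)) p) r' c'
      = if c' = c ∧ 1 ≤ r' ∧ r' ≤ t+1 then ∑ i ∈ Finset.range r', pvNG 0 p (i+1) c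
        else pvNG 0 p r' c' := by
  intro t
  induction t with
  | zero =>
    intro _ p hp r' c'
    simp only [List.range_zero, List.foldl_nil]
    split_ifs with h
    · rw [show r' = 1 by omega, Finset.sum_range_one, h.1]
    · rfl
  | succ t ih =>
    intro ht p hp r' c'
    rw [List.range_succ, List.foldl_append, List.foldl_cons, List.foldl_nil]
    have hq : pvDims ((List.range t).foldl
        (fun p k => pvNS p (k+2) c (pvNG 0 p (k+2) c + pvNG 0 p (k+1) c)) p) (n+1) (m+1) :=
      pvDims_foldl _ (fun p x hp => pvDims_pvNS hp _ _ _) _ _ hp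
    rw [pvNG_pvNS 0 hq (by omega) (by omega), ih (by omega) p hp (t+2) c,
      ih (by omega) p hp (t+1) c, ih (by omega) p hp r' c']
    rw [if_neg (show ¬(c = c ∧ 1 ≤ t+2 ∧ t+2 ≤ t+1) by omega),
      if_pos (show c = c ∧ 1 ≤ t+1 ∧ t+1 ≤ t+1 by omega)]
    by_cases hout : r' = t+2 ∧ c' = c
    · rw [if_pos hout, if_pos (show c' = c ∧ 1 ≤ r' ∧ r' ≤ t+1+1 by omega)]
      rw [hout.1, show t+2 = (t+1)+1 by omega, Finset.sum_range_succ, Finset.sum_range_succ]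
      ring_nf
      rw [Nat.add_comm 1 t, Finset.sum_range_succ]
      ring_nf
    · rw [if_neg hout]
      by_cases hin : c' = c ∧ 1 ≤ r' ∧ r' ≤ t+1
      · rw [if_pos hin, if_pos (by omega)]
      · rw [if_neg hin, if_neg (by omega)]

lemma pvPass3 {n m : Nat} (hn1 : 1 ≤ n) :
    ∀ (s : Nat), s ≤ m → ∀ (p : List (List Int)), pvDims p (n+1) (m+1) → ∀ r' c',
    pvNG 0 ((List.range s).foldl (fun p k => (List.range (n-1)).foldl
        (fun p j => pvNS p (j+2) (k+1) (pvNG 0 p (j+2) (k+1) + pvNG 0 p (j+1) (k+1))) p) p) r' c'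
      = if 1 ≤ c' ∧ c' ≤ s ∧ 1 ≤ r' ∧ r' ≤ n then ∑ i ∈ Finset.range r', pvNG 0 p (i+1) c'
        else pvNG 0 p r' c' := by
  intro s
  induction s with
  | zero => intro _ p hp r' c'; simp [List.range_zero]; intro h; omega
  | succ s ih =>
    intro hs p hp r' c'
    rw [List.range_succ, List.foldl_append, List.foldl_cons, List.foldl_nil]
    have hq : pvDims ((List.range s).foldl (fun p k => (List.range (n-1)).foldl
        (fun p j => pvNS p (j+2) (k+1) (pvNG 0 p (j+2) (k+1) + pvNG 0 p (j+1) (k+1))) p) p) (n+1) (m+1) :=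
      pvDims_foldl _ (fun p x hp => pvDims_foldl _ (fun p x hp => pvDims_pvNS hp _ _ _) _ _ hp) _ _ hp
    rw [pvAcc3 (s+1) (by omega) (n-1) (by omega) _ hq]
    by_cases hout : c' = s+1 ∧ 1 ≤ r' ∧ r' ≤ (n-1)+1
    · rw [if_pos hout, if_pos (show 1 ≤ c' ∧ c' ≤ s+1 ∧ 1 ≤ r' ∧ r' ≤ n by omega)]
      apply Finset.sum_congr rfl
      intro i hi
      rw [ih (by omega) p hp (i+1) (s+1), if_neg (by omega), hout.1]
    · rw [if_neg hout, ih (by omega) p hp r' c']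
      by_cases hin : 1 ≤ c' ∧ c' ≤ s ∧ 1 ≤ r' ∧ r' ≤ n
      · rw [if_pos hin, if_pos (by omega)]
      · rw [if_neg hin, if_neg (by omega)]

lemma pvFoldlSum (f : Nat → Int) : ∀ (t : Nat) (init : Int),
    (List.range t).foldl (fun s k => s + f k) init = init + ∑ k ∈ Finset.range t, f k := by
  intro t
  induction t with
  | zero => intro init; simp
  | succ t ih =>
    intro init
    rw [List.range_succ, List.foldl_append, List.foldl_cons, List.foldl_nil, ih,
      Finset.sum_range_succ]
    ring

lemma pvTele (g : Nat → Nat → Int) (r c h w : Nat) :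
    (∑ i ∈ Finset.range (r+h), ∑ j ∈ Finset.range (c+w), g i j)
      - (∑ i ∈ Finset.range (r+h), ∑ j ∈ Finset.range c, g i j)
      - (∑ i ∈ Finset.range r, ∑ j ∈ Finset.range (c+w), g i j)
      + (∑ i ∈ Finset.range r, ∑ j ∈ Finset.range c, g i j)
    = ∑ i ∈ Finset.range h, ∑ j ∈ Finset.range w, g (r+i) (c+j) := by
  rw [Finset.sum_range_add (fun i => ∑ j ∈ Finset.range (c+w), g i j) r h,
    Finset.sum_range_add (fun i => ∑ j ∈ Finset.range c, g i j) r h]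
  have hrow : ∀ i : Nat, (∑ j ∈ Finset.range (c+w), g i j)
      = (∑ j ∈ Finset.range c, g i j) + ∑ j ∈ Finset.range w, g i (c+j) :=
    fun i => Finset.sum_range_add (fun j => g i j) c w
  simp only [hrow, Finset.sum_add_distrib]
  ring

lemma pvFoldlPyRange {β : Type} (a b : Int) (f : β → Int → β) (init : β) :
    (PySem.List.pyRange a b 1).foldl f init
      = (List.range (b-a).toNat).foldl (fun s (k : Nat) => f s (a + (k : Int))) init := by
  rw [PySem.List.pyRange_one, List.foldl_map]

lemma pvNG_map_const {α : Type} (v : α) (l1 l2 : List Int) (r c : Nat) :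
    pvNG v (l1.map (fun _ => l2.map (fun _ => v))) r c = v := by
  unfold pvNG
  simp only [List.getD_eq_getElem?_getD, List.getElem?_map]
  cases l1[r]? with
  | none => rfl
  | some x =>
    simp only [Option.map_some, Option.getD_some, List.getElem?_map]
    cases l2[c]? <;> rfl

lemma pvDims_map_const {α : Type} (v : α) (a b : Int) (ha : 0 ≤ a) (hb : 0 ≤ b) :
    pvDims ((PySem.List.pyRange 0 a 1).map (fun _ => (PySem.List.pyRange 0 b 1).map (fun _ => v)))
      a.toNat b.toNat := by
  constructor
  · rw [List.length_map, PySem.List.length_pyRange_one]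
    omega
  · intro row hrow
    rcases List.mem_map.mp hrow with ⟨_, _, hrow⟩
    rw [← hrow, List.length_map, PySem.List.length_pyRange_one]
    omega

lemma pvLen_pySetD {α : Type} (xs : List α) (i : Int) (v : α) :
    (PySem.List.pySetD xs i v).length = xs.length := by
  unfold PySem.List.pySetD PySem.List.pySet?
  cases PySem.List.pyIdx? xs.length i <;> simp

lemma pvIdx_lt {n : Nat} {i : Int} {k : Nat} (h : PySem.List.pyIdx? n i = some k) : k < n := by
  unfold PySem.List.pyIdx? at h
  split_ifs at h <;> simp_all <;> omega

lemma pvDims_pvSet2 {α : Type} {p : List (List α)} {n m : Nat} (h : pvDims p n m)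
    (r c : Int) (v : α) : pvDims (pvSet2 p r c v) n m := by
  unfold pvSet2
  set row' := PySem.List.pySetD (PySem.List.pyGetD p r []) c v with hrow'
  have hL : row'.length = (PySem.List.pyGetD p r []).length := pvLen_pySetD _ _ _
  unfold PySem.List.pySetD PySem.List.pySet?
  cases hIdx : PySem.List.pyIdx? p.length r with
  | none => simpa using h
  | some k =>
    simp only [Option.map_some, Option.getD_some]
    refine ⟨by rw [List.length_set]; exact h.1, ?_⟩
    intro row hrow
    rcases List.mem_or_eq_of_mem_set hrow with h1 | h1
    · exact h.2 _ h1
    · rw [h1, hL]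
      have hk : k < p.length := pvIdx_lt hIdx
      unfold PySem.List.pyGetD PySem.List.pyGet?
      rw [hIdx]
      simp only [Option.bind_some, List.getElem?_eq_getElem hk, Option.getD_some]
      exact h.2 _ (List.getElem_mem _)

def pvPref0 (N M : Int) : List (List Int) :=
  (PySem.List.pyRange 0 (N + 1) 1).map
    (fun _ => (PySem.List.pyRange 0 (M + 1) 1).map (fun _ => (0 : Int)))

def pvPref1 (N M : Int) (grid : List (List Int)) : List (List Int) :=
  (PySem.List.pyRange 1 (N + 1) 1).foldl (fun p r =>
    (PySem.List.pyRange 1 (M + 1) 1).foldl (fun p c =>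
      pvSet2 p r c (pvGet2 0 grid (r - 1) (c - 1))) p) (pvPref0 N M)

def pvPref2 (N M : Int) (grid : List (List Int)) : List (List Int) :=
  (PySem.List.pyRange 1 (N + 1) 1).foldl (fun p r =>
    (PySem.List.pyRange 1 M 1).foldl (fun p c =>
      pvSet2 p r (c + 1) (pvGet2 0 p r (c + 1) + pvGet2 0 p r c)) p) (pvPref1 N M grid)

def pvPref3 (N M : Int) (grid : List (List Int)) : List (List Int) :=
  (PySem.List.pyRange 1 (M + 1) 1).foldl (fun p c =>
    (PySem.List.pyRange 1 N 1).foldl (fun p r =>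
      pvSet2 p (r + 1) c (pvGet2 0 p (r + 1) c + pvGet2 0 p r c)) p) (pvPref2 N M grid)

lemma pvDims_pref0 (N M : Int) (hN : 1 ≤ N) (hM : 1 ≤ M) :
    pvDims (pvPref0 N M) (N.toNat + 1) (M.toNat + 1) := by
  have := pvDims_map_const (0 : Int) (N + 1) (M + 1) (by omega) (by omega)
  rwa [show ((N:Int) + 1).toNat = N.toNat + 1 by omega,
    show ((M:Int) + 1).toNat = M.toNat + 1 by omega] at this

lemma pvDims_pref1 (N M : Int) (grid : List (List Int)) (hN : 1 ≤ N) (hM : 1 ≤ M) :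
    pvDims (pvPref1 N M grid) (N.toNat + 1) (M.toNat + 1) := by
  unfold pvPref1
  exact pvDims_foldl _ (fun p x hp =>
    pvDims_foldl _ (fun p x hp => pvDims_pvSet2 hp _ _ _) _ _ hp) _ _ (pvDims_pref0 N M hN hM)

lemma pvDims_pref2 (N M : Int) (grid : List (List Int)) (hN : 1 ≤ N) (hM : 1 ≤ M) :
    pvDims (pvPref2 N M grid) (N.toNat + 1) (M.toNat + 1) := by
  unfold pvPref2
  exact pvDims_foldl _ (fun p x hp =>
    pvDims_foldl _ (fun p x hp => pvDims_pvSet2 hp _ _ _) _ _ hp) _ _ (pvDims_pref1 N M grid hN hM)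

lemma pvPref1_entry (N M : Int) (grid : List (List Int)) (hN : 1 ≤ N) (hM : 1 ≤ M) (r' c' : Nat) :
    pvNG 0 (pvPref1 N M grid) r' c'
      = if 1 ≤ r' ∧ r' ≤ N.toNat ∧ 1 ≤ c' ∧ c' ≤ M.toNat
        then pvNG 0 grid (r' - 1) (c' - 1) else 0 := by
  unfold pvPref1
  rw [pvFoldlPyRange, show ((N:Int) + 1 - 1).toNat = N.toNat by omega]
  have hbody : ∀ (s : List (List Int)) (k : Nat),
      (PySem.List.pyRange 1 (M + 1) 1).foldl
        (fun p c => pvSet2 p (1 + (k:Int)) c (pvGet2 0 grid (1 + (k:Int) - 1) (c - 1))) s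
      = (List.range M.toNat).foldl (fun p j => pvNS p (k+1) (j+1) (pvNG 0 grid k j)) s := by
    intro s k
    rw [pvFoldlPyRange, show ((M:Int) + 1 - 1).toNat = M.toNat by omega]
    have hfun : (fun (q : List (List Int)) (j : Nat) =>
        pvSet2 q (1 + (k:Int)) (1 + (j:Int)) (pvGet2 0 grid (1 + (k:Int) - 1) (1 + (j:Int) - 1)))
        = (fun q j => pvNS q (k+1) (j+1) (pvNG 0 grid k j)) := by
      funext q j
      rw [show (1:Int) + (k:Int) - 1 = (k:Int) by ring, show (1:Int) + (j:Int) - 1 = (j:Int) by ring,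
        pvGet2_nonneg _ _ _ _ (by omega) (by omega), pvSet2_nonneg _ _ _ _ (by omega) (by omega)]
      simp only [Int.toNat_natCast, show ((1:Int) + (k:Int)).toNat = k + 1 from by omega,
        show ((1:Int) + (j:Int)).toNat = j + 1 from by omega]
    rw [hfun]
  simp only [hbody]
  rw [pvWrite2 0 (fun k j => pvNG 0 grid k j) M.toNat le_rfl N.toNat le_rfl _
    (pvDims_pref0 N M hN hM)]
  split_ifs
  · rfl
  · exact pvNG_map_const 0 _ _ _ _

lemma pvPref2_entry (N M : Int) (grid : List (List Int)) (hN : 1 ≤ N) (hM : 1 ≤ M) (r' c' : Nat) :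
    pvNG 0 (pvPref2 N M grid) r' c'
      = if 1 ≤ r' ∧ r' ≤ N.toNat ∧ 1 ≤ c' ∧ c' ≤ M.toNat
        then ∑ j ∈ Finset.range c', pvNG 0 grid (r' - 1) j else 0 := by
  unfold pvPref2
  rw [pvFoldlPyRange, show ((N:Int) + 1 - 1).toNat = N.toNat by omega]
  have hbody : ∀ (s : List (List Int)) (k : Nat),
      (PySem.List.pyRange 1 M 1).foldl
        (fun p c => pvSet2 p (1 + (k:Int)) (c + 1) (pvGet2 0 p (1 + (k:Int)) (c + 1) + pvGet2 0 p (1 + (k:Int)) c)) s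
      = (List.range (M.toNat - 1)).foldl
          (fun p j => pvNS p (k+1) (j+2) (pvNG 0 p (k+1) (j+2) + pvNG 0 p (k+1) (j+1))) s := by
    intro s k
    rw [pvFoldlPyRange, show ((M:Int) - 1).toNat = M.toNat - 1 by omega]
    have hfun : (fun (q : List (List Int)) (j : Nat) =>
        pvSet2 q (1 + (k:Int)) ((1 + (j:Int)) + 1) (pvGet2 0 q (1 + (k:Int)) ((1 + (j:Int)) + 1) + pvGet2 0 q (1 + (k:Int)) (1 + (j:Int))))
        = (fun q j => pvNS q (k+1) (j+2) (pvNG 0 q (k+1) (j+2) + pvNG 0 q (k+1) (j+1))) := by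
      funext q j
      rw [pvGet2_nonneg _ _ _ _ (by omega) (by omega), pvGet2_nonneg _ _ _ _ (by omega) (by omega),
        pvSet2_nonneg _ _ _ _ (by omega) (by omega)]
      simp only [show ((1:Int) + (k:Int)).toNat = k + 1 from by omega,
        show ((1:Int) + (j:Int) + 1).toNat = j + 2 from by omega,
        show ((1:Int) + (j:Int)).toNat = j + 1 from by omega]
    rw [hfun]
  simp only [hbody]
  rw [pvPass2 (by omega) N.toNat le_rfl _ (pvDims_pref1 N M grid hN hM)]
  by_cases hcond : 1 ≤ r' ∧ r' ≤ N.toNat ∧ 1 ≤ c' ∧ c' ≤ M.toNat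
  · rw [if_pos hcond, if_pos hcond]
    apply Finset.sum_congr rfl
    intro j hj
    rw [pvPref1_entry N M grid hN hM, if_pos (by simp at hj; omega), Nat.add_sub_cancel]
  · rw [if_neg hcond, if_neg hcond, pvPref1_entry N M grid hN hM, if_neg hcond]

lemma pvPref3_entry (N M : Int) (grid : List (List Int)) (hN : 1 ≤ N) (hM : 1 ≤ M) (r' c' : Nat)
    (hr : r' ≤ N.toNat) (hc : c' ≤ M.toNat) :
    pvNG 0 (pvPref3 N M grid) r' c'
      = ∑ i ∈ Finset.range r', ∑ j ∈ Finset.range c', pvNG 0 grid i j := by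
  unfold pvPref3
  rw [pvFoldlPyRange, show ((M:Int) + 1 - 1).toNat = M.toNat by omega]
  have hbody : ∀ (s : List (List Int)) (k : Nat),
      (PySem.List.pyRange 1 N 1).foldl
        (fun p r => pvSet2 p (r + 1) (1 + (k:Int)) (pvGet2 0 p (r + 1) (1 + (k:Int)) + pvGet2 0 p r (1 + (k:Int)))) s
      = (List.range (N.toNat - 1)).foldl
          (fun p j => pvNS p (j+2) (k+1) (pvNG 0 p (j+2) (k+1) + pvNG 0 p (j+1) (k+1))) s := by
    intro s k
    rw [pvFoldlPyRange, show ((N:Int) - 1).toNat = N.toNat - 1 by omega]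
    have hfun : (fun (q : List (List Int)) (j : Nat) =>
        pvSet2 q ((1 + (j:Int)) + 1) (1 + (k:Int)) (pvGet2 0 q ((1 + (j:Int)) + 1) (1 + (k:Int)) + pvGet2 0 q (1 + (j:Int)) (1 + (k:Int))))
        = (fun q j => pvNS q (j+2) (k+1) (pvNG 0 q (j+2) (k+1) + pvNG 0 q (j+1) (k+1))) := by
      funext q j
      rw [pvGet2_nonneg _ _ _ _ (by omega) (by omega), pvGet2_nonneg _ _ _ _ (by omega) (by omega),
        pvSet2_nonneg _ _ _ _ (by omega) (by omega)]
      simp only [show ((1:Int) + (k:Int)).toNat = k + 1 from by omega,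
        show ((1:Int) + (j:Int) + 1).toNat = j + 2 from by omega,
        show ((1:Int) + (j:Int)).toNat = j + 1 from by omega]
    rw [hfun]
  simp only [hbody]
  rw [pvPass3 (by omega) M.toNat le_rfl _ (pvDims_pref2 N M grid hN hM)]
  by_cases hcond : 1 ≤ c' ∧ c' ≤ M.toNat ∧ 1 ≤ r' ∧ r' ≤ N.toNat
  · rw [if_pos hcond]
    apply Finset.sum_congr rfl
    intro i hi
    rw [pvPref2_entry N M grid hN hM, if_pos (by simp at hi; omega), Nat.add_sub_cancel]
  · rw [if_neg hcond, pvPref2_entry N M grid hN hM, if_neg (by omega)]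
    have : r' = 0 ∨ c' = 0 := by omega
    rcases this with h | h <;> rw [h] <;> simp

def pvFalses (N M : Int) : List (List Bool) :=
  (PySem.List.pyRange 0 N 1).map (fun _ => (PySem.List.pyRange 0 M 1).map (fun _ => false))

def pvAbleA (N M : Int) (grid : List (List Int)) (H W : Int) : List (List Bool) :=
  (PySem.List.pyRange 0 (N - H + 1) 1).foldl (fun a r =>
    (PySem.List.pyRange 0 (M - W + 1) 1).foldl (fun a c =>
      pvSet2 a r c (decide (pvGet2 0 (pvPref3 N M grid) (r + H) (c + W)
        - pvGet2 0 (pvPref3 N M grid) (r + H) c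
        - pvGet2 0 (pvPref3 N M grid) r (c + W)
        + pvGet2 0 (pvPref3 N M grid) r c = 0))) a) (pvFalses N M)

def pvAbleB (N M : Int) (grid : List (List Int)) (H W : Int) : List (List Bool) :=
  (PySem.List.pyRange 0 (N - H + 1) 1).foldl (fun a r =>
    (PySem.List.pyRange 0 (M - W + 1) 1).foldl (fun a c =>
      pvSet2 a r c (decide ((PySem.List.pyRange 0 H 1).foldl (fun s i =>
        (PySem.List.pyRange 0 W 1).foldl (fun s j =>
          s + pvGet2 0 grid (r + i) (c + j)) s) 0 = 0))) a) (pvFalses N M)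

lemma pvQuery (N M H W : Int) (grid : List (List Int)) (hN : 1 ≤ N) (hM : 1 ≤ M)
    (hH : 1 ≤ H) (hW : 1 ≤ W) (r c : Int) (hr0 : 0 ≤ r) (hrb : r < N - H + 1)
    (hc0 : 0 ≤ c) (hcb : c < M - W + 1) :
    pvGet2 0 (pvPref3 N M grid) (r + H) (c + W) - pvGet2 0 (pvPref3 N M grid) (r + H) c
      - pvGet2 0 (pvPref3 N M grid) r (c + W) + pvGet2 0 (pvPref3 N M grid) r c
    = ∑ i ∈ Finset.range H.toNat, ∑ j ∈ Finset.range W.toNat,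
        pvNG 0 grid (r.toNat + i) (c.toNat + j) := by
  rw [pvGet2_nonneg _ _ _ _ (by omega) (by omega), pvGet2_nonneg _ _ _ _ (by omega) (by omega),
    pvGet2_nonneg _ _ _ _ (by omega) (by omega), pvGet2_nonneg _ _ _ _ (by omega) (by omega),
    pvPref3_entry N M grid hN hM _ _ (by omega) (by omega),
    pvPref3_entry N M grid hN hM _ _ (by omega) (by omega),
    pvPref3_entry N M grid hN hM _ _ (by omega) (by omega),
    pvPref3_entry N M grid hN hM _ _ (by omega) (by omega),
    show (r + H).toNat = r.toNat + H.toNat by omega,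
    show (c + W).toNat = c.toNat + W.toNat by omega]
  exact pvTele (pvNG 0 grid) r.toNat c.toNat H.toNat W.toNat

lemma pvBlock (H W : Int) (grid : List (List Int)) (hH : 0 ≤ H) (hW : 0 ≤ W)
    (r c : Int) (hr0 : 0 ≤ r) (hc0 : 0 ≤ c) :
    (PySem.List.pyRange 0 H 1).foldl (fun s i =>
      (PySem.List.pyRange 0 W 1).foldl (fun s j => s + pvGet2 0 grid (r + i) (c + j)) s) 0
    = ∑ i ∈ Finset.range H.toNat, ∑ j ∈ Finset.range W.toNat,
        pvNG 0 grid (r.toNat + i) (c.toNat + j) := by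
  rw [pvFoldlPyRange, show ((H:Int) - 0).toNat = H.toNat by omega]
  have hbody : ∀ (s : Int) (k : Nat),
      (PySem.List.pyRange 0 W 1).foldl (fun s j => s + pvGet2 0 grid (r + (0 + (k:Int))) (c + j)) s
      = s + ∑ j ∈ Finset.range W.toNat, pvNG 0 grid (r.toNat + k) (c.toNat + j) := by
    intro s k
    rw [pvFoldlPyRange, show ((W:Int) - 0).toNat = W.toNat by omega]
    have hfun : (fun (s : Int) (j : Nat) => s + pvGet2 0 grid (r + (0 + (k:Int))) (c + (0 + (j:Int))))
        = fun s j => s + pvNG 0 grid (r.toNat + k) (c.toNat + j) := by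
      funext s j
      rw [pvGet2_nonneg _ _ _ _ (by omega) (by omega)]
      simp only [show (r + (0 + (k:Int))).toNat = r.toNat + k from by omega,
        show (c + (0 + (j:Int))).toNat = c.toNat + j from by omega]
    rw [hfun, pvFoldlSum]
  simp only [hbody]
  rw [pvFoldlSum, zero_add]

lemma pvAble_eq (N M H W : Int) (grid : List (List Int)) (hN : 1 ≤ N) (hM : 1 ≤ M)
    (hHW : N - H + 1 ≤ 0 ∨ M - W + 1 ≤ 0 ∨ (1 ≤ H ∧ 1 ≤ W)) :
    pvAbleA N M grid H W = pvAbleB N M grid H W := by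
  by_cases hE1 : N - H + 1 ≤ 0
  · unfold pvAbleA pvAbleB
    simp only [PySem.List.pyRange_one_eq_nil (show (N - H + 1 : Int) ≤ 0 by omega), List.foldl_nil]
  by_cases hE2 : M - W + 1 ≤ 0
  · unfold pvAbleA pvAbleB
    simp only [PySem.List.pyRange_one_eq_nil (show (M - W + 1 : Int) ≤ 0 by omega), List.foldl_nil]
  have hH : 1 ≤ H := by rcases hHW with h | h | h <;> omega
  have hW : 1 ≤ W := by rcases hHW with h | h | h <;> omega
  unfold pvAbleA pvAbleB
  apply PySem.List.foldl_congr_mem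
  intro a r hrmem
  apply PySem.List.foldl_congr_mem
  intro b c hcmem
  have hr := (PySem.List.mem_pyRange_one).mp hrmem
  have hc := (PySem.List.mem_pyRange_one).mp hcmem
  congr 1
  rw [pvQuery N M H W grid hN hM hH hW r c (by omega) (by omega) (by omega) (by omega),
    pvBlock H W grid (by omega) (by omega) r c (by omega) (by omega)]

lemma pvSolutionA_eq (N M : Int) (grid : List (List Int)) (H W Sr Sc Fr Fc : Int) :
    solution N M grid H W Sr Sc Fr Fc
      = pvBFS N M (Fr - 1) (Fc - 1) (pvAbleA N M grid H W) ((N * M).toNat + 2)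
          [(Sr - 1, Sc - 1)] (pvSet2 (pvFalses N M) (Sr - 1) (Sc - 1) true) 0 := rfl

lemma pvSolutionB_eq (N M : Int) (grid : List (List Int)) (H W Sr Sc Fr Fc : Int) :
    solution_alt N M grid H W Sr Sc Fr Fc
      = pvBFS N M (Fr - 1) (Fc - 1) (pvAbleB N M grid H W) ((N * M).toNat + 2)
          [(Sr - 1, Sc - 1)] (pvSet2 (pvFalses N M) (Sr - 1) (Sc - 1) true) 0 := rfl

-- ===== VERDICT (by name: the statement is the Claim_ definition above) =====
theorem solution_spec : Claim_equal_solution := by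
  intro N M grid H W Sr Sc Fr Fc hdom hpre
  obtain ⟨h1, h2, h3, h4, h5, h6, h7⟩ := hpre
  unfold Spec_solution
  rw [pvSolutionA_eq, pvSolutionB_eq, pvAble_eq N M H W grid h1 h2 h5]
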